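-- pv_equiv track=rewrite | github.com/UltimaRatio-Regum/voxlibris | backend/text_parser.py | _build_speaker_normalization_map
-- ===== SOURCE A (Python) =====
-- def _build_speaker_normalization_map(speakers: set[str]) -> dict[str, str]:
--     name_map: dict[str, str] = {}
--     speaker_list = sorted(speakers, key=len)
--
--     for i, short in enumerate(speaker_list):
--         for long_name in speaker_list[i+1:]:
--             if short in long_name.split():
--                 name_map[long_name] = short
--                 break
--
--     return name_map
-- ===== SOURCE B (Python) =====
-- def _build_speaker_normalization_map(speakers: "set[str]") -> "dict[str, str]":
--     speaker_list = sorted(speakers, key=len)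
--
--     # inverted index: word -> indices (ascending) of names containing it
--     pairs = [(w, j) for j, name in enumerate(speaker_list) for w in name.split()]
--     index: dict = {}
--     for w, j in pairs:
--         index.setdefault(w, []).append(j)
--
--     name_map: dict = {}
--     for i, short in enumerate(speaker_list):
--         for j in index.get(short, []):
--             if j > i:
--                 name_map[speaker_list[j]] = short
--                 break
--     return name_map
-- ===== Notes on version B (the rewrite author's own statement) =====
-- stated objective: faster
-- what changed: Replaces the quadratic scan of all longer names per short name by an inverted index word->ascending index list built in one pass, so each short name only scans the occurrence list of its own word.
import Mathlib
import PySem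

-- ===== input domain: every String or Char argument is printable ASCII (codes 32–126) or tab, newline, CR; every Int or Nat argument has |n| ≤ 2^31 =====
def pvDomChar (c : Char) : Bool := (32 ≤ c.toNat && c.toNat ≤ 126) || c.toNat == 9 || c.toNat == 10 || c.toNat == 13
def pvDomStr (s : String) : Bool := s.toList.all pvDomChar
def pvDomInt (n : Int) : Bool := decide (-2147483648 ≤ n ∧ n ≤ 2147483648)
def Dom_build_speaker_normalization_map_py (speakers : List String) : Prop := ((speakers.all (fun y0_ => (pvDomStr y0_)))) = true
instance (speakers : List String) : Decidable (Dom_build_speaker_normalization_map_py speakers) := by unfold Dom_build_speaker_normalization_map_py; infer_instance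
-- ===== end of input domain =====

-- B replaces A's quadratic scan of all longer names per short name by an inverted index
-- word -> ascending list of name indices, built in one pass (objective: faster).

-- ===== PORT A =====
-- inner loop 'for long_name in speaker_list[i+1:]: if short in long_name.split(): …; break'
def pvInnerA (m : PySem.Dict String String) (short : String) : List String → PySem.Dict String String
  | [] => m
  | long :: rest =>
      if (PySem.Str.split₀ long).contains short then m.insert long short
      else pvInnerA m short rest

def build_speaker_normalization_map_py (speakers : List String) : List (String × String) :=
  let speaker_list := PySem.List.sorted speakers (key := fun s => PySem.Str.len s)
  let name_map :=
    (PySem.List.enumerate speaker_list).foldl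
      (fun m p => pvInnerA m p.2 (PySem.List.slice speaker_list (some (p.1 + 1)) none))
      PySem.Dict.empty
  name_map.items

-- ===== PORT B =====
-- inner loop 'for j in index.get(short, []): if j > i: …; break'
def pvInnerB (m : PySem.Dict String String) (speaker_list : List String) (i : Int) (short : String) :
    List Int → PySem.Dict String String
  | [] => m
  | j :: rest =>
      if i < j then m.insert (PySem.List.pyGetD speaker_list j "") short
      else pvInnerB m speaker_list i short rest

def build_speaker_normalization_map_py_alt (speakers : List String) : List (String × String) :=
  let speaker_list := PySem.List.sorted speakers (key := fun s => PySem.Str.len s)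
  let pairs := (PySem.List.enumerate speaker_list).flatMap
      (fun p => (PySem.Str.split₀ p.2).map (fun w => (w, p.1)))
  let index : PySem.Dict String (List Int) :=
    pairs.foldl (fun d p => d.modify p.1 [] (fun l => l ++ [p.2])) PySem.Dict.empty
  let name_map :=
    (PySem.List.enumerate speaker_list).foldl
      (fun m p => pvInnerB m speaker_list p.1 p.2 (index.getD p.2 []))
      PySem.Dict.empty
  name_map.items

-- ===== PRECONDITION & SPEC =====
def Spec_build_speaker_normalization_map_py (speakers : List String) (out : List (String × String)) : Prop := out = build_speaker_normalization_map_py_alt speakers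
instance (speakers : List String) (out : List (String × String)) : Decidable (Spec_build_speaker_normalization_map_py speakers out) := by unfold Spec_build_speaker_normalization_map_py; infer_instance

-- ===== CLAIM (what is proved, stated in full; the proofs are below) =====
def Claim_equal_build_speaker_normalization_map_py : Prop := ∀ (speakers : List String), Dom_build_speaker_normalization_map_py speakers → Spec_build_speaker_normalization_map_py speakers (build_speaker_normalization_map_py speakers)

-- ===== LEMMAS AND PROOFS =====

-- A's inner loop is a find?-then-insert
theorem pvInnerA_eq (s : String) (rest : List String) (m : PySem.Dict String String) :
    pvInnerA m s rest = match rest.find? (fun long => (PySem.Str.split₀ long).contains s) with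
      | some long => m.insert long s
      | none => m := by
  induction rest generalizing m with
  | nil => rfl
  | cons long rest ih =>
      simp only [pvInnerA, List.find?_cons]
      cases hc : (PySem.Str.split₀ long).contains s
      · simpa using ih m
      · simp

-- B's inner loop is a find?-then-insert
theorem pvInnerB_eq (lst : List String) (i : Int) (s : String) (js : List Int)
    (m : PySem.Dict String String) :
    pvInnerB m lst i s js = match js.find? (fun j => decide (i < j)) with
      | some j => m.insert (PySem.List.pyGetD lst j "") s
      | none => m := by
  induction js generalizing m with
  | nil => rfl
  | cons j js ih =>
      simp only [pvInnerB, List.find?_cons]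
      by_cases hj : i < j
      · simp [hj]
      · simpa [hj] using ih m

theorem pvFind?_flatMap {α β : Type} (h : α → List β) (q : β → Bool) (l : List α) :
    (l.flatMap h).find? q = l.findSome? (fun x => (h x).find? q) := by
  induction l with
  | nil => rfl
  | cons x l ih =>
      simp only [List.flatMap_cons, List.find?_append, List.findSome?_cons, ih]
      cases (h x).find? q <;> rfl

theorem pvFindSome?_guard {α β : Type} (C : α → Bool) (g : α → β) (l : List α) :
    l.findSome? (fun x => if C x then some (g x) else none) = (l.find? C).map g := by
  induction l with
  | nil => rfl
  | cons x l ih =>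
      simp only [List.findSome?_cons, List.find?_cons]
      cases hc : C x
      · simpa using ih
      · simp

theorem pvFindSome?_congr {α β : Type} (f g : α → Option β) (l : List α)
    (h : ∀ x ∈ l, f x = g x) : l.findSome? f = l.findSome? g := by
  induction l with
  | nil => rfl
  | cons x l ih =>
      simp only [List.findSome?_cons, h x (List.mem_cons_self)]
      cases g x
      · exact ih (fun y hy => h y (List.mem_cons_of_mem _ hy))
      · rfl

theorem pvReplicate_find? (c : Nat) (j i : Int) :
    (List.replicate c j).find? (fun j' => decide (i < j')) =
      if c ≠ 0 ∧ i < j then some j else none := by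
  cases c with
  | zero => simp
  | succ c =>
      by_cases hj : i < j
      · simp [List.replicate_succ, hj]
      · simp only [List.replicate_succ, List.find?_cons]
        simp [hj]

-- the inverted index at key s: the indices (in order) of the names containing s, with multiplicity
theorem pvIndex_getD (lst : List String) (s : String) :
    (((PySem.List.enumerate lst).flatMap
        (fun p => (PySem.Str.split₀ p.2).map (fun w => (w, p.1)))).foldl
        (fun d p => d.modify p.1 [] (fun l => l ++ [p.2])) PySem.Dict.empty).getD s []
      = (PySem.List.enumerate lst).flatMap
          (fun p => List.replicate ((PySem.Str.split₀ p.2).count s) p.1) := by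
  rw [PySem.Dict.getD_foldl_modify_append, PySem.Dict.getD_empty, List.nil_append,
    List.filter_flatMap]
  rw [List.map_flatMap]
  congr 1
  funext p
  rw [List.filter_map, List.map_map]
  have : ((PySem.Str.split₀ p.2).filter ((fun q : String × Int => q.1 == s) ∘ fun w => (w, p.1)))
      = (PySem.Str.split₀ p.2).filter (fun w => w == s) := rfl
  rw [this]
  have hcnt : ((PySem.Str.split₀ p.2).filter (fun w => w == s)).length
      = (PySem.Str.split₀ p.2).count s := (List.count_eq_length_filter).symm
  calc ((PySem.Str.split₀ p.2).filter (fun w => w == s)).map ((fun q : String × Int => q.2) ∘ fun w => (w, p.1))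
      = ((PySem.Str.split₀ p.2).filter (fun w => w == s)).map (fun _ => p.1) := rfl
    _ = List.replicate ((PySem.Str.split₀ p.2).filter (fun w => w == s)).length p.1 := by
          rw [List.map_const']
    _ = List.replicate ((PySem.Str.split₀ p.2).count s) p.1 := by rw [hcnt]

-- the common step: find the first later name containing short as a word, map it to short
def pvStep (lst : List String) (m : PySem.Dict String String) (p : Int × String) :
    PySem.Dict String String :=
  match ((PySem.List.enumerate lst 0).drop (p.1.toNat + 1)).find?
      (fun q => (PySem.Str.split₀ q.2).contains p.2) with
  | some q => m.insert q.2 p.2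
  | none => m

theorem pvStepA (lst : List String) (p : Int × String) (hp : p ∈ PySem.List.enumerate lst 0)
    (m : PySem.Dict String String) :
    pvInnerA m p.2 (PySem.List.slice lst (some (p.1 + 1)) none) = pvStep lst m p := by
  obtain ⟨k, hk, rfl⟩ := (PySem.List.mem_enumerate_iff lst 0 p).mp hp
  have h0 : (0 : Int) + (k : Int) = (k : Int) := by ring
  rw [pvInnerA_eq]
  have hslice : PySem.List.slice lst (some ((0 + (k : Int)) + 1)) none = lst.drop (k + 1) := by
    rw [PySem.List.slice_from lst (by omega)]
    congr 1
    omega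
  rw [hslice]
  have hdrop : lst.drop (k + 1) =
      ((PySem.List.enumerate lst 0).drop (k + 1)).map (fun q => q.2) := by
    rw [List.map_drop, PySem.List.map_snd_enumerate]
  rw [hdrop, List.find?_map]
  have htn : ((0 + (k : Int), lst[k]).1.toNat + 1) = k + 1 := by simp
  rw [pvStep, htn]
  have hcomp : ((fun long => (PySem.Str.split₀ long).contains (0 + (k : Int), lst[k]).2) ∘
      (fun q : Int × String => q.2))
      = fun q : Int × String => (PySem.Str.split₀ q.2).contains (0 + (k : Int), lst[k]).2 := rfl
  rw [hcomp]
  cases hfind : ((PySem.List.enumerate lst 0).drop (k + 1)).find?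
      (fun q => (PySem.Str.split₀ q.2).contains (0 + (k : Int), lst[k]).2) <;>
    simp

theorem pvStepB (lst : List String) (p : Int × String) (hp : p ∈ PySem.List.enumerate lst 0)
    (m : PySem.Dict String String) :
    pvInnerB m lst p.1 p.2
      ((((PySem.List.enumerate lst).flatMap
          (fun p => (PySem.Str.split₀ p.2).map (fun w => (w, p.1)))).foldl
          (fun d p => d.modify p.1 [] (fun l => l ++ [p.2])) PySem.Dict.empty).getD p.2 [])
      = pvStep lst m p := by
  obtain ⟨k, hk, rfl⟩ := (PySem.List.mem_enumerate_iff lst 0 p).mp hp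
  set e := PySem.List.enumerate lst 0 with he
  rw [pvInnerB_eq, pvIndex_getD]
  rw [pvFind?_flatMap]
  set s := (0 + (k : Int), lst[k]).2 with hs
  set i := (0 + (k : Int), lst[k]).1 with hi
  have hieq : i = (k : Int) := by simp [hi]
  -- rewrite the per-element option
  have hcongr1 : e.findSome?
      (fun x => (List.replicate ((PySem.Str.split₀ x.2).count s) x.1).find? (fun j => decide (i < j)))
      = e.findSome? (fun x => if (PySem.Str.split₀ x.2).count s ≠ 0 ∧ i < x.1 then some x.1 else none) := by
    apply pvFindSome?_congr
    intro x _
    exact pvReplicate_find? _ _ _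
  rw [hcongr1]
  -- split e at position k+1
  have hsplit : e = e.take (k + 1) ++ e.drop (k + 1) := (List.take_append_drop _ _).symm
  rw [hsplit, List.findSome?_append]
  have hlen : e.length = lst.length := by simp [he, PySem.List.length_enumerate]
  -- the first part yields none: all its indices are ≤ k
  have hnone : (e.take (k + 1)).findSome?
      (fun x => if (PySem.Str.split₀ x.2).count s ≠ 0 ∧ i < x.1 then some x.1 else none) = none := by
    rw [List.findSome?_eq_none_iff]
    intro x hx
    obtain ⟨t, ht, hxe⟩ := List.mem_take_iff_getElem.mp hx
    have ht' : t < e.length := lt_of_lt_of_le ht (min_le_right _ _)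
    have hx1 : x.1 = (t : Int) := by
      simp only [he] at hxe
      rw [PySem.List.getElem_enumerate lst 0 t (by simpa [he] using ht')] at hxe
      rw [← hxe]
      simp
    have : ¬ i < x.1 := by
      rw [hx1, hieq]
      have : t ≤ k := by omega
      exact_mod_cast not_lt.mpr (by exact_mod_cast this)
    simp [this]
  rw [hnone, Option.none_or]
  -- on the second part, i < x.1 always holds
  have hcongr2 : (e.drop (k + 1)).findSome?
      (fun x => if (PySem.Str.split₀ x.2).count s ≠ 0 ∧ i < x.1 then some x.1 else none)
      = (e.drop (k + 1)).findSome?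
        (fun x => if (PySem.Str.split₀ x.2).contains s then some x.1 else none) := by
    apply pvFindSome?_congr
    intro x hx
    obtain ⟨t, ht, hxe⟩ := List.mem_iff_getElem.mp hx
    have ht' : k + 1 + t < e.length := by
      have := ht
      simp only [List.length_drop] at this
      omega
    have hx1 : x.1 = ((k + 1 + t : Nat) : Int) := by
      have hge := List.getElem_drop (xs := e) (i := k + 1) (j := t) (h := ht)
      rw [hge] at hxe
      simp only [he] at hxe
      rw [PySem.List.getElem_enumerate lst 0 (k + 1 + t) (by simpa [he] using ht')] at hxe
      rw [← hxe]
      simp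
    have hlt : i < x.1 := by
      rw [hx1, hieq]
      exact_mod_cast (by omega : k < k + 1 + t)
    by_cases hc : s ∈ PySem.Str.split₀ x.2
    · have h1 : (PySem.Str.split₀ x.2).count s ≠ 0 := by
        have := List.count_pos_iff.mpr hc
        omega
      have h2 : (PySem.Str.split₀ x.2).contains s = true := List.contains_iff_mem.mpr hc
      simp [h1, hlt, hc]
    · have h1 : (PySem.Str.split₀ x.2).count s = 0 := by
        by_contra h
        exact hc (List.count_pos_iff.mp (by omega))
      have h2 : (PySem.Str.split₀ x.2).contains s = false := by
        by_contra h
        exact hc (List.contains_iff_mem.mp (by simpa using h))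
      simp [h1, hc]
  rw [hcongr2, pvFindSome?_guard]
  -- now compare with pvStep
  have htn : i.toNat + 1 = k + 1 := by rw [hieq]; simp
  rw [pvStep]
  rw [← he, ← hs]
  rw [show ((0 + (k : Int), lst[k]).1.toNat + 1) = k + 1 from by simp]
  cases hfind : (e.drop (k + 1)).find? (fun q => (PySem.Str.split₀ q.2).contains s) with
  | none => rfl
  | some q =>
      simp only [Option.map_some]
      have hqmem : q ∈ e := List.mem_of_mem_drop (List.mem_of_find?_eq_some hfind)
      obtain ⟨k', hk', hq⟩ := (PySem.List.mem_enumerate_iff lst 0 q).mp (by rwa [he] at hqmem)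
      have : PySem.List.pyGetD lst q.1 "" = q.2 := by
        rw [hq]
        simp only
        rw [show ((0:Int) + (k' : Int)) = ((k' : Nat) : Int) from by ring]
        rw [PySem.List.pyGetD_natCast]
        exact List.getD_eq_getElem _ _ hk'
      rw [this]

-- ===== VERDICT (by name: the statement is the Claim_ definition above) =====
theorem build_speaker_normalization_map_py_spec : Claim_equal_build_speaker_normalization_map_py := by
  intro speakers _
  show build_speaker_normalization_map_py speakers = build_speaker_normalization_map_py_alt speakers
  simp only [build_speaker_normalization_map_py, build_speaker_normalization_map_py_alt]
  congr 1
  refine Eq.trans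
    (PySem.List.foldl_congr_mem' _ _
      (fun m p => pvStep (PySem.List.sorted speakers (key := fun s => PySem.Str.len s)) m p) _ ?_)
    (Eq.symm (PySem.List.foldl_congr_mem' _ _
      (fun m p => pvStep (PySem.List.sorted speakers (key := fun s => PySem.Str.len s)) m p) _ ?_))
  · intro p hp m
    exact pvStepA _ p hp m
  · intro p hp m
    exact pvStepB _ p hp m
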